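-- pv_equiv track=rewrite | github.com/thomasnormal/circt | utils/mutation_mcy/lib/native_mutation_plan.py | count_if_cond_negate_sites
-- ===== SOURCE A (Python) =====
-- def is_code_span(mask: list[bool], start: int, end: int) -> bool:
--     if start < 0 or end > len(mask) or start >= end:
--         return False
--     return all(mask[i] for i in range(start, end))
--
-- def is_code_at(mask: list[bool], pos: int) -> bool:
--     return 0 <= pos < len(mask) and mask[pos]
--
-- def is_identifier_body(ch: str) -> bool:
--     return ch.isalnum() or ch in ("_", "$")
--
-- def find_matching_paren(text: str, mask: list[bool], open_pos: int) -> int: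
--     if open_pos < 0 or open_pos >= len(text):
--         return -1
--     if not is_code_at(mask, open_pos) or text[open_pos] != "(":
--         return -1
--     depth = 0
--     i = open_pos
--     n = len(text)
--     while i < n:
--         if not is_code_at(mask, i):
--             i += 1
--             continue
--         ch = text[i]
--         if ch == "(":
--             depth += 1
--         elif ch == ")":
--             depth -= 1
--             if depth == 0:
--                 return i
--             if depth < 0:
--                 return -1
--         i += 1
--     return -1
--
-- def count_if_cond_negate_sites(text: str, mask: list[bool]) -> int:
--     count = 0
--     i = 0
--     n = len(text)
--     while i + 1 < n:
--         if not is_code_span(mask, i, i + 2) or not text.startswith("if", i):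
--             i += 1
--             continue
--         prev = text[i - 1] if i > 0 and is_code_at(mask, i - 1) else ""
--         nxt = text[i + 2] if i + 2 < n and is_code_at(mask, i + 2) else ""
--         if (prev and is_identifier_body(prev)) or (nxt and is_identifier_body(nxt)):
--             i += 1
--             continue
--         j = i + 2
--         while j < n and ((not is_code_at(mask, j)) or text[j].isspace()):
--             j += 1
--         if j >= n or not is_code_at(mask, j) or text[j] != "(":
--             i += 1
--             continue
--         k = find_matching_paren(text, mask, j)
--         if k < 0:
--             i += 1
--             continue
--         count += 1
--         i += 1
--     return count
-- ===== SOURCE B (Python) =====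
-- def is_identifier_body(ch: str) -> bool:
--     return ch.isalnum() or ch in ("_", "$")
--
-- def count_if_cond_negate_sites(text: str, mask: list[bool]) -> int:
--     # One linear pass of precomputation, then one linear scan:
--     # D = prefix paren-depth over code chars; M = suffix minimum of D
--     # (a code '(' at j has a matching code ')' iff min(D[j+1:]) <= D[j]);
--     # nxt = next code non-space index at or after each position.
--     n = len(text)
--     code = [i < len(mask) and mask[i] for i in range(n)]
--     D = [0] * (n + 1)
--     for i in range(n):
--         d = D[i]
--         if code[i]:
--             if text[i] == "(":
--                 d += 1
--             elif text[i] == ")":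
--                 d -= 1
--         D[i + 1] = d
--     M = [0] * (n + 1)
--     M[n] = D[n]
--     for i in range(n - 1, -1, -1):
--         M[i] = min(D[i], M[i + 1])
--     nxt = [n] * (n + 1)
--     for i in range(n - 1, -1, -1):
--         nxt[i] = i if code[i] and not text[i].isspace() else nxt[i + 1]
--     count = 0
--     for i in range(n - 1):
--         if not (code[i] and code[i + 1] and text[i] == "i" and text[i + 1] == "f"):
--             continue
--         if i > 0 and code[i - 1] and is_identifier_body(text[i - 1]):
--             continue
--         if i + 2 < n and code[i + 2] and is_identifier_body(text[i + 2]):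
--             continue
--         j = nxt[i + 2]
--         if j < n and text[j] == "(" and M[j + 1] <= D[j]:
--             count += 1
--     return count
-- ===== Notes on version B (the rewrite author's own statement) =====
-- stated objective: faster
-- what changed: Replaces the per-site forward rescans (whitespace skip and depth-counting paren matching, O(n) each inside the O(n) outer loop) with three linear precomputed arrays - prefix code-paren depth, its suffix minimum, and next-code-nonspace index - so each candidate 'if' site is decided in O(1) in a single scan.
import Mathlib
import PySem

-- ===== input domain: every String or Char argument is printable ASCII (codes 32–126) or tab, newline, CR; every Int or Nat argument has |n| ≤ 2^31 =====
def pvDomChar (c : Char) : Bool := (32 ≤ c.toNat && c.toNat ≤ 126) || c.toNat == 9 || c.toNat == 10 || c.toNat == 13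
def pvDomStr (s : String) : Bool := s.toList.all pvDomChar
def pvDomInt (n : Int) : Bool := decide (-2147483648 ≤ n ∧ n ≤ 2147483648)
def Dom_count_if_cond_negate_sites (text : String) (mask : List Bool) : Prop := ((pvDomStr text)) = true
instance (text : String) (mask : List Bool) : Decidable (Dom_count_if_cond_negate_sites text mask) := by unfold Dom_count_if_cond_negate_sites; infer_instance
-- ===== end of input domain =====

-- B replaces A's per-site forward rescans (whitespace skip and depth-counting paren matching)
-- by three precomputed linear tables (prefix code-paren depth, its suffix minimum, next
-- code-nonspace index) and one scan deciding each 'if' site in O(1).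

-- ===== PORT A =====
-- is_identifier_body (used verbatim by both Pythons)
def pvIsIdentBody (c : Char) : Bool :=
  PySem.Chars.isalnum c || (c == '_' || c == '$')

-- is_code_at
def pvIsCodeAt (mask : List Bool) (p : Nat) : Bool :=
  decide (p < mask.length) && mask.getD p false

-- is_code_span (only ever called with start = i, end = i+2; start < 0 impossible on Nat)
def pvIsCodeSpan (mask : List Bool) (s e : Nat) : Bool :=
  if e > mask.length || s ≥ e then false
  else (List.range' s (e - s)).all (fun i => mask.getD i false)

-- the 'while i < n' loop of find_matching_paren
def pvFindLoop (cs : List Char) (mask : List Bool) (n : Nat) (depth : Int) (i : Nat) : Int :=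
  if i < n then
    if !pvIsCodeAt mask i then pvFindLoop cs mask n depth (i + 1)
    else
      let ch := cs.getD i ' '
      if ch = '(' then pvFindLoop cs mask n (depth + 1) (i + 1)
      else if ch = ')' then
        if depth - 1 = 0 then (i : Int)
        else if depth - 1 < 0 then -1
        else pvFindLoop cs mask n (depth - 1) (i + 1)
      else pvFindLoop cs mask n depth (i + 1)
  else -1
termination_by n - i

-- find_matching_paren (open_pos is the Nat index j of the main loop, so open_pos < 0 is impossible)
def pvFindMatchingParen (cs : List Char) (mask : List Bool) (openPos : Nat) : Int :=
  if openPos ≥ cs.length then -1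
  else if !pvIsCodeAt mask openPos || !(cs.getD openPos ' ' == '(') then -1
  else pvFindLoop cs mask cs.length 0 openPos

-- the inner 'while j < n and ...' whitespace/non-code skip loop
def pvSkipLoop (cs : List Char) (mask : List Bool) (n : Nat) (j : Nat) : Nat :=
  if j < n then
    if !pvIsCodeAt mask j || PySem.Chars.isspace (cs.getD j ' ') then pvSkipLoop cs mask n (j + 1)
    else j
  else j
termination_by n - j

-- the body of one iteration of the main loop: does position i count as a site?
def pvSiteA (cs : List Char) (mask : List Bool) (n i : Nat) : Bool :=
  if !pvIsCodeSpan mask i (i + 2) || !(List.isPrefixOf ['i', 'f'] (cs.drop i)) then false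
  else
    let prevOk := decide (0 < i) && pvIsCodeAt mask (i - 1) && pvIsIdentBody (cs.getD (i - 1) ' ')
    let nxtOk := decide (i + 2 < n) && pvIsCodeAt mask (i + 2) && pvIsIdentBody (cs.getD (i + 2) ' ')
    if prevOk || nxtOk then false
    else
      let j := pvSkipLoop cs mask n (i + 2)
      if decide (j ≥ n) || !pvIsCodeAt mask j || !(cs.getD j ' ' == '(') then false
      else if pvFindMatchingParen cs mask j < 0 then false
      else true

-- the main 'while i + 1 < n' loop
def pvMainLoop (cs : List Char) (mask : List Bool) (n : Nat) (i : Nat) (count : Int) : Int :=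
  if i + 1 < n then
    pvMainLoop cs mask n (i + 1) (if pvSiteA cs mask n i then count + 1 else count)
  else count
termination_by n - i

def count_if_cond_negate_sites (text : String) (mask : List Bool) : Int :=
  pvMainLoop text.toList mask text.toList.length 0 0

-- ===== PORT B =====
-- code[i]  (mask.getD i false is exactly "i < len(mask) and mask[i]")
def pvCodeB (mask : List Bool) (i : Nat) : Bool := mask.getD i false

-- "code[i] and not text[i].isspace()"
def pvGoodB (cs : List Char) (mask : List Bool) (i : Nat) : Bool :=
  pvCodeB mask i && !PySem.Chars.isspace (cs.getD i ' ')

-- D[t]: prefix paren-depth over code chars (the recurrence of Source B's first loop)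
def pvD (cs : List Char) (mask : List Bool) : Nat → Int
  | 0 => 0
  | t + 1 =>
      let d := pvD cs mask t
      if pvCodeB mask t then
        if cs.getD t ' ' == '(' then d + 1
        else if cs.getD t ' ' == ')' then d - 1
        else d
      else d

-- M[t] = min(D[t], M[t+1]), M[n] = D[n] (Source B's backwards minimum loop)
def pvM (cs : List Char) (mask : List Bool) (n : Nat) (t : Nat) : Int :=
  if t < n then min (pvD cs mask t) (pvM cs mask n (t + 1)) else pvD cs mask n
termination_by n - t

-- nxt[t] = t if good else nxt[t+1], nxt[n] = n (Source B's backwards next-code-nonspace loop)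
def pvNxt (cs : List Char) (mask : List Bool) (n : Nat) (t : Nat) : Nat :=
  if t < n then (if pvGoodB cs mask t then t else pvNxt cs mask n (t + 1)) else n
termination_by n - t

-- the per-i condition of Source B's counting loop
def pvSiteB (cs : List Char) (mask : List Bool) (n i : Nat) : Bool :=
  pvCodeB mask i && pvCodeB mask (i + 1) &&
  (cs.getD i ' ' == 'i') && (cs.getD (i + 1) ' ' == 'f') &&
  !(decide (0 < i) && pvCodeB mask (i - 1) && pvIsIdentBody (cs.getD (i - 1) ' ')) &&
  !(decide (i + 2 < n) && pvCodeB mask (i + 2) && pvIsIdentBody (cs.getD (i + 2) ' ')) &&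
  (let j := pvNxt cs mask n (i + 2)
   decide (j < n) && (cs.getD j ' ' == '(') &&
   decide (pvM cs mask n (j + 1) ≤ pvD cs mask j))

def count_if_cond_negate_sites_alt (text : String) (mask : List Bool) : Int :=
  let cs := text.toList
  let n := cs.length
  (List.range (n - 1)).foldl (fun (c : Int) i => if pvSiteB cs mask n i then c + 1 else c) 0

-- ===== PRECONDITION & SPEC =====
def Spec_count_if_cond_negate_sites (text : String) (mask : List Bool) (out : Int) : Prop := out = count_if_cond_negate_sites_alt text mask
instance (text : String) (mask : List Bool) (out : Int) : Decidable (Spec_count_if_cond_negate_sites text mask out) := by unfold Spec_count_if_cond_negate_sites; infer_instance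

-- ===== CLAIM (what is proved, stated in full; the proofs are below) =====
def Claim_equal_count_if_cond_negate_sites : Prop := ∀ (text : String) (mask : List Bool), Dom_count_if_cond_negate_sites text mask → Spec_count_if_cond_negate_sites text mask (count_if_cond_negate_sites text mask)

-- ===== LEMMAS AND PROOFS =====

-- is_code_at equals B's padded mask lookup
theorem pv_isCodeAt_eq (mask : List Bool) (p : Nat) : pvIsCodeAt mask p = pvCodeB mask p := by
  unfold pvIsCodeAt pvCodeB
  by_cases h : p < mask.length
  · simp [h]
  · simp [h, List.getD_eq_getElem?_getD]

-- is_code_span mask i (i+2) = code i && code (i+1)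
theorem pv_span_eq (mask : List Bool) (i : Nat) :
    pvIsCodeSpan mask i (i + 2) = (pvCodeB mask i && pvCodeB mask (i + 1)) := by
  by_cases h : i + 2 > mask.length
  · have h1 : ¬ (i + 1 < mask.length) := by omega
    simp [pvIsCodeSpan, h, pvCodeB, List.getD_eq_getElem?_getD, le_of_not_gt h1]
  · have : i + 2 - i = 2 := by omega
    simp [pvIsCodeSpan, h, this, List.range', pvCodeB]

-- startswith "if" at i, when i + 1 < n
theorem pv_startswith_eq (cs : List Char) (i : Nat) (h : i + 1 < cs.length) :
    List.isPrefixOf ['i', 'f'] (cs.drop i) = ((cs.getD i ' ' == 'i') && (cs.getD (i + 1) ' ' == 'f')) := by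
  rw [List.drop_eq_getElem_cons (by omega : i < cs.length),
      List.drop_eq_getElem_cons (by omega : i + 1 < cs.length)]
  simp [List.isPrefixOf, List.getD_eq_getElem?_getD, h,
        (by omega : i < cs.length), BEq.comm]

-- A's skip loop equals B's nxt table
theorem pv_skipCond_eq (cs : List Char) (mask : List Bool) (j : Nat) :
    (!pvIsCodeAt mask j || PySem.Chars.isspace (cs.getD j ' ')) = !pvGoodB cs mask j := by
  unfold pvGoodB
  rw [pv_isCodeAt_eq]
  cases pvCodeB mask j <;> cases PySem.Chars.isspace (cs.getD j ' ') <;> rfl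

theorem pv_skip_eq_nxt (cs : List Char) (mask : List Bool) (n : Nat) :
    ∀ k j, n ≤ j + k → j ≤ n → pvSkipLoop cs mask n j = pvNxt cs mask n j := by
  intro k
  induction k with
  | zero =>
      intro j hj hj2
      have : ¬ j < n := by omega
      unfold pvSkipLoop pvNxt
      simp only [this, if_false]
      omega
  | succ k ih =>
      intro j hj hj2
      unfold pvSkipLoop pvNxt
      by_cases hjn : j < n
      · simp only [hjn, if_true, pv_skipCond_eq]
        by_cases hg : pvGoodB cs mask j
        · simp [hg]
        · simp only [Bool.not_eq_true] at hg
          simp only [hg, Bool.not_false, if_true, Bool.false_eq_true, if_false]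
          exact ih (j + 1) (by omega) (by omega)
      · simp only [hjn, if_false]
        omega

-- if nxt lands strictly below n, the position is good (code and non-space)
theorem pv_nxt_good (cs : List Char) (mask : List Bool) (n : Nat) :
    ∀ k j, n ≤ j + k → pvNxt cs mask n j < n → pvGoodB cs mask (pvNxt cs mask n j) := by
  intro k
  induction k with
  | zero =>
      intro j hj hlt
      unfold pvNxt at hlt ⊢
      have : ¬ j < n := by omega
      simp [this] at hlt
  | succ k ih =>
      intro j hj hlt
      unfold pvNxt at hlt ⊢
      by_cases hjn : j < n
      · simp only [hjn, if_true] at hlt ⊢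
        by_cases hg : pvGoodB cs mask j
        · simp [hg]
        · simp only [hg, Bool.false_eq_true, if_false] at hlt ⊢
          exact ih (j + 1) (by omega) hlt
      · simp [hjn] at hlt

-- one step of D moves by at most 1
theorem pvD_succ_bounds (cs : List Char) (mask : List Bool) (t : Nat) :
    pvD cs mask t - 1 ≤ pvD cs mask (t + 1) ∧ pvD cs mask (t + 1) ≤ pvD cs mask t + 1 := by
  simp only [pvD]
  split_ifs <;> omega

-- M t is the minimum of D over [t, n]
theorem pvM_le_iff (cs : List Char) (mask : List Bool) (n : Nat) (v : Int) :
    ∀ k t, n ≤ t + k → t ≤ n →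
      (pvM cs mask n t ≤ v ↔ ∃ s, t ≤ s ∧ s ≤ n ∧ pvD cs mask s ≤ v) := by
  intro k
  induction k with
  | zero =>
      intro t h1 h2
      have ht : t = n := by omega
      rw [ht]
      unfold pvM; simp only [lt_irrefl, if_false]
      exact ⟨fun h => ⟨n, le_refl n, le_refl n, h⟩, fun ⟨s, h1, h2, h3⟩ => by
        have : s = n := by omega
        exact this ▸ h3⟩
  | succ k ih =>
      intro t h1 h2
      by_cases htn : t < n
      · unfold pvM; simp only [htn, if_true, min_le_iff]
        rw [ih (t + 1) (by omega) (by omega)]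
        constructor
        · rintro (h | ⟨s, hs1, hs2, hs3⟩)
          · exact ⟨t, le_refl t, by omega, h⟩
          · exact ⟨s, by omega, hs2, hs3⟩
        · rintro ⟨s, hs1, hs2, hs3⟩
          rcases Nat.eq_or_lt_of_le hs1 with h | h
          · exact Or.inl (h ▸ hs3)
          · exact Or.inr ⟨s, by omega, hs2, hs3⟩
      · have ht : t = n := by omega
        rw [ht]
        unfold pvM; simp only [lt_irrefl, if_false]
        exact ⟨fun h => ⟨n, le_refl n, le_refl n, h⟩, fun ⟨s, h1', h2', h3⟩ => by
          have : s = n := by omega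
          exact this ▸ h3⟩

-- A's find loop returns a nonnegative result iff the relative depth ever returns to 0
theorem pv_findLoop_nonneg_iff (cs : List Char) (mask : List Bool) (n : Nat) :
    ∀ k i (d : Int), n ≤ i + k → 1 ≤ d →
      (0 ≤ pvFindLoop cs mask n d i ↔
        ∃ t, i ≤ t ∧ t < n ∧ pvD cs mask (t + 1) = pvD cs mask i - d) := by
  intro k
  induction k with
  | zero =>
      intro i d h1 _
      unfold pvFindLoop
      simp [Nat.not_lt.mpr (by omega : n ≤ i)]
      intro t h3 h4; omega
  | succ k ih =>
      intro i d h1 hd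
      by_cases hin : i < n
      · have hstep : ∀ (d' : Int), 1 ≤ d' →
            (0 ≤ pvFindLoop cs mask n d' (i + 1) ↔
              ∃ t, i + 1 ≤ t ∧ t < n ∧ pvD cs mask (t + 1) = pvD cs mask (i + 1) - d') :=
          fun d' hd' => ih (i + 1) d' (by omega) hd'
        unfold pvFindLoop
        simp only [hin, if_true]
        by_cases hc : pvIsCodeAt mask i
        · have hcB : pvCodeB mask i = true := by rw [← pv_isCodeAt_eq]; exact hc
          simp only [hc, Bool.not_true, if_false, Bool.false_eq_true]
          by_cases hop : cs.getD i ' ' = '('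
          · have hD : pvD cs mask (i + 1) = pvD cs mask i + 1 := by
              simp only [pvD, hcB, hop]; simp
            rw [if_pos hop]
            rw [hstep (d + 1) (by omega)]
            constructor
            · rintro ⟨t, h1', h2', h3'⟩; exact ⟨t, by omega, h2', by rw [h3', hD]; ring⟩
            · rintro ⟨t, h1', h2', h3'⟩
              refine ⟨t, ?_, h2', by rw [h3', hD]; ring⟩
              rcases Nat.eq_or_lt_of_le h1' with h | h
              · exfalso; rw [← h, hD] at h3'; omega
              · omega
          · by_cases hcl : cs.getD i ' ' = ')'
            · have hD : pvD cs mask (i + 1) = pvD cs mask i - 1 := by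
                simp only [pvD, hcB, hcl]
                simp
              rw [if_neg hop, if_pos hcl]
              rcases eq_or_lt_of_le hd with hd1 | hd2
              · have : d - 1 = 0 := by omega
                rw [if_pos this]
                constructor
                · intro _; exact ⟨i, le_refl i, hin, by rw [hD]; omega⟩
                · intro _; exact_mod_cast Int.natCast_nonneg i
              · have h10 : ¬ (d - 1 = 0) := by omega
                have h11 : ¬ (d - 1 < 0) := by omega
                rw [if_neg h10, if_neg h11]
                rw [hstep (d - 1) (by omega)]
                constructor
                · rintro ⟨t, h1', h2', h3'⟩; exact ⟨t, by omega, h2', by rw [h3', hD]; ring⟩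
                · rintro ⟨t, h1', h2', h3'⟩
                  refine ⟨t, ?_, h2', by rw [h3', hD]; ring⟩
                  rcases Nat.eq_or_lt_of_le h1' with h | h
                  · exfalso; rw [← h, hD] at h3'; omega
                  · omega
            · have hD : pvD cs mask (i + 1) = pvD cs mask i := by
                have h1 : (cs.getD i ' ' == '(') = false := by simpa using hop
                have h2 : (cs.getD i ' ' == ')') = false := by simpa using hcl
                simp only [pvD, hcB, h1, h2]; simp
              rw [if_neg hop, if_neg hcl]
              rw [hstep d hd]
              constructor
              · rintro ⟨t, h1', h2', h3'⟩; exact ⟨t, by omega, h2', by rw [h3', hD]⟩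
              · rintro ⟨t, h1', h2', h3'⟩
                refine ⟨t, ?_, h2', by rw [h3', hD]⟩
                rcases Nat.eq_or_lt_of_le h1' with h | h
                · exfalso; rw [← h, hD] at h3'; omega
                · omega
        · have hcB : pvCodeB mask i = false := by rw [← pv_isCodeAt_eq]; simpa using hc
          have hD : pvD cs mask (i + 1) = pvD cs mask i := by simp [pvD, hcB]
          simp only [hc, Bool.not_false, if_true]
          rw [hstep d hd]
          constructor
          · rintro ⟨t, h1', h2', h3'⟩; exact ⟨t, by omega, h2', by rw [h3', hD]⟩
          · rintro ⟨t, h1', h2', h3'⟩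
            refine ⟨t, ?_, h2', by rw [h3', hD]⟩
            rcases Nat.eq_or_lt_of_le h1' with h | h
            · exfalso; rw [← h, hD] at h3'; omega
            · omega
      · unfold pvFindLoop
        simp [hin]
        intro t h3 h4; omega

-- for a code '(' at j < n: A's matcher succeeds iff B's suffix-minimum test succeeds
theorem pv_match_iff (cs : List Char) (mask : List Bool) (j : Nat)
    (hj : j < cs.length) (hcode : pvCodeB mask j = true) (hop : cs.getD j ' ' = '(') :
    (0 ≤ pvFindMatchingParen cs mask j) ↔
      pvM cs mask cs.length (j + 1) ≤ pvD cs mask j := by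
  have hDj : pvD cs mask (j + 1) = pvD cs mask j + 1 := by
    simp only [pvD, hcode, hop]; simp
  have hfm : pvFindMatchingParen cs mask j = pvFindLoop cs mask cs.length 1 (j + 1) := by
    have hc : pvIsCodeAt mask j = true := by rw [pv_isCodeAt_eq]; exact hcode
    have hb : (cs.getD j ' ' == '(') = true := by simpa using hop
    unfold pvFindMatchingParen
    rw [if_neg (by omega), if_neg (by simp [hc]; rw [← List.getD_eq_getElem?_getD]; exact hop)]
    rw [pvFindLoop]
    rw [if_pos hj]
    simp only [hc, Bool.not_true, Bool.false_eq_true, if_false]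
    rw [if_pos hop]
    norm_num
  rw [hfm, pv_findLoop_nonneg_iff cs mask cs.length cs.length (j + 1) 1 (by omega) (by omega),
      pvM_le_iff cs mask cs.length (pvD cs mask j) cs.length (j + 1) (by omega) (by omega)]
  constructor
  · rintro ⟨t, h1, h2, h3⟩
    exact ⟨t + 1, by omega, by omega, by rw [h3, hDj]; omega⟩
  · rintro ⟨s, h1, h2, h3⟩
    have hex : ∃ m, j + 1 ≤ m ∧ m ≤ cs.length ∧ pvD cs mask m ≤ pvD cs mask j :=
      ⟨s, h1, h2, h3⟩
    obtain ⟨hs1, hs2, hs3⟩ := Nat.find_spec hex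
    have hge : j + 2 ≤ Nat.find hex := by
      rcases Nat.eq_or_lt_of_le hs1 with h | h
      · exfalso; rw [← h, hDj] at hs3; omega
      · omega
    have hprev := Nat.find_min hex (by omega : Nat.find hex - 1 < Nat.find hex)
    have hDp : pvD cs mask j < pvD cs mask (Nat.find hex - 1) := by
      by_contra hcon
      exact hprev ⟨by omega, by omega, by omega⟩
    have hstep := pvD_succ_bounds cs mask (Nat.find hex - 1)
    have hs0 : Nat.find hex - 1 + 1 = Nat.find hex := by omega
    rw [hs0] at hstep
    refine ⟨Nat.find hex - 1, by omega, by omega, ?_⟩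
    rw [hs0, hDj]
    omega

-- the per-iteration condition of A equals the per-i condition of B
theorem pv_siteA_eq_siteB (cs : List Char) (mask : List Bool) (i : Nat)
    (h : i + 1 < cs.length) :
    pvSiteA cs mask cs.length i = pvSiteB cs mask cs.length i := by
  have hn2 : i + 2 ≤ cs.length := by omega
  rw [Bool.eq_iff_iff]
  unfold pvSiteA pvSiteB
  rw [pv_span_eq, pv_startswith_eq cs i h,
      pv_skip_eq_nxt cs mask cs.length cs.length (i + 2) (by omega) hn2,
      pv_isCodeAt_eq, pv_isCodeAt_eq]
  by_cases h0 : (pvCodeB mask i && pvCodeB mask (i + 1) &&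
      ((cs.getD i ' ' == 'i') && (cs.getD (i + 1) ' ' == 'f'))) = true
  · rw [if_neg (by simp_all)]
    have h0' : (pvCodeB mask i && pvCodeB mask (i + 1) &&
        (cs.getD i ' ' == 'i') && (cs.getD (i + 1) ' ' == 'f')) = true := by
      simp only [Bool.and_assoc] at h0 ⊢; exact h0
    simp only [h0', Bool.true_and]
    by_cases hpn : (decide (0 < i) && pvCodeB mask (i - 1) && pvIsIdentBody (cs.getD (i - 1) ' ')
        || decide (i + 2 < cs.length) && pvCodeB mask (i + 2) && pvIsIdentBody (cs.getD (i + 2) ' ')) = true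
    · rw [if_pos hpn]
      rcases Bool.or_eq_true_iff.mp hpn with hx | hx
      · simp only [hx, Bool.not_true, Bool.false_and, Bool.false_eq_true]
      · simp only [hx, Bool.not_true, Bool.and_false, Bool.false_and, Bool.false_eq_true]
    · rw [if_neg hpn]
      rw [Bool.or_eq_true_iff] at hpn
      rw [not_or] at hpn
      obtain ⟨hp, hq⟩ := hpn
      simp only [Bool.not_eq_true] at hp hq
      simp only [hp, hq, Bool.not_false, Bool.true_and]
      by_cases hjn : pvNxt cs mask cs.length (i + 2) < cs.length
      · have hgood := pv_nxt_good cs mask cs.length cs.length (i + 2) (by omega) hjn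
        have hcodej : pvCodeB mask (pvNxt cs mask cs.length (i + 2)) = true :=
          Bool.and_elim_left hgood
        by_cases hopj : cs.getD (pvNxt cs mask cs.length (i + 2)) ' ' = '('
        · have hbop : (cs.getD (pvNxt cs mask cs.length (i + 2)) ' ' == '(') = true := by
            simpa using hopj
          have hgA : decide (cs.length ≤ pvNxt cs mask cs.length (i + 2)) = false := by
            simp [Nat.not_le.mpr hjn]
          have hgB : (!pvIsCodeAt mask (pvNxt cs mask cs.length (i + 2))) = false := by
            rw [pv_isCodeAt_eq, hcodej]; rfl
          have hgC : (!(cs.getD (pvNxt cs mask cs.length (i + 2)) ' ' == '(')) = false := by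
            rw [hbop]; rfl
          have hgel : cs[pvNxt cs mask cs.length (i + 2)]'hjn = '(' := by
            rwa [List.getD_eq_getElem cs ' ' hjn] at hopj
          rw [if_neg (by rw [hgA, hgB, hgC]; simp)]
          have hmatch := pv_match_iff cs mask (pvNxt cs mask cs.length (i + 2)) hjn hcodej hopj
          by_cases hfind : pvFindMatchingParen cs mask (pvNxt cs mask cs.length (i + 2)) < 0
          · rw [if_pos hfind]
            have : ¬ pvM cs mask cs.length (pvNxt cs mask cs.length (i + 2) + 1) ≤
                pvD cs mask (pvNxt cs mask cs.length (i + 2)) := fun hM => by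
              have := hmatch.mpr hM; omega
            simp [this]
          · rw [if_neg hfind]
            have : pvM cs mask cs.length (pvNxt cs mask cs.length (i + 2) + 1) ≤
                pvD cs mask (pvNxt cs mask cs.length (i + 2)) := hmatch.mp (by omega)
            simp [hjn, hgel, this]
        · have hbop : (cs.getD (pvNxt cs mask cs.length (i + 2)) ' ' == '(') = false := by
            simpa using hopj
          have hopj' : ¬ cs[pvNxt cs mask cs.length (i + 2)]?.getD ' ' = '(' := by
            rwa [← List.getD_eq_getElem?_getD]
          rw [if_pos (by rw [hbop]; simp)]
          simp [hopj']
      · rw [if_pos (by simp [Nat.le_of_not_lt hjn])]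
        simp [hjn]
  · have hB : (pvCodeB mask i && pvCodeB mask (i + 1) &&
        (cs.getD i ' ' == 'i') && (cs.getD (i + 1) ' ' == 'f')) = false := by
      revert h0
      cases pvCodeB mask i <;> cases pvCodeB mask (i + 1) <;>
        cases cs.getD i ' ' == 'i' <;> cases cs.getD (i + 1) ' ' == 'f' <;> simp
    rw [if_pos (by
      revert hB
      cases pvCodeB mask i <;> cases pvCodeB mask (i + 1) <;>
        cases cs.getD i ' ' == 'i' <;> cases cs.getD (i + 1) ' ' == 'f' <;> simp)]
    rw [hB]
    simp

-- A's main loop counts the sites in [i, n-1)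
theorem pv_mainLoop_eq (cs : List Char) (mask : List Bool) (n : Nat) :
    ∀ k i (c : Int), i + k = n - 1 →
      pvMainLoop cs mask n i c =
        c + ((List.range' i k).countP (fun t => pvSiteA cs mask n t) : Int) := by
  intro k
  induction k with
  | zero =>
      intro i c hk
      unfold pvMainLoop
      rw [if_neg (by omega)]
      simp
  | succ k ih =>
      intro i c hk
      unfold pvMainLoop
      rw [if_pos (by omega)]
      rw [ih (i + 1) _ (by omega)]
      rw [List.range'_succ, List.countP_cons]
      by_cases hs : pvSiteA cs mask n i
      · simp [hs]; ring
      · simp [hs]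

-- ===== VERDICT (by name: the statement is the Claim_ definition above) =====
theorem count_if_cond_negate_sites_spec : Claim_equal_count_if_cond_negate_sites := by
  intro text mask _
  unfold Spec_count_if_cond_negate_sites count_if_cond_negate_sites count_if_cond_negate_sites_alt
  rw [pv_mainLoop_eq text.toList mask text.toList.length (text.toList.length - 1) 0 0 (by omega)]
  rw [PySem.List.foldl_count_if, List.range_eq_range']
  rw [List.countP_congr (fun t ht => ?_)]
  rw [pv_siteA_eq_siteB text.toList mask t (by
    have := List.mem_range'.mp ht; omega)]
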